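-- pv_equiv track=rewrite | github.com/daniel2828/PythonAlgoritms | LongSubsequence.py | obtenerSecuenciasRec
-- ===== SOURCE A (Python) =====
-- def obtenerSecuenciasRec(x, y, m, n, matriz):
--     # Condicion de salida
--     if m == 0 or n == 0:
--         return [""]
--
--     if (x[m - 1] == y[n - 1]):
--         nuevoSet = obtenerSecuenciasRec(x, y, m - 1, n - 1, matriz)
--         i = 0
--         while i < len(nuevoSet):
--             nuevoSet[i] = nuevoSet[i] + x[m - 1]
--             i += 1
--         return nuevoSet;
--
--     if matriz[m - 1][n] > matriz[m][n - 1]: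
--         return obtenerSecuenciasRec(x, y, m - 1, n, matriz)
--
--     if matriz[m][n - 1] > matriz[m - 1][n]:
--         return obtenerSecuenciasRec(x, y, m, n - 1, matriz)
--
--     listaTop = obtenerSecuenciasRec(x, y, m - 1, n, matriz)
--     listaLeft = obtenerSecuenciasRec(x, y, m, n - 1, matriz)
--     listaTop += listaLeft
--     return listaTop
-- ===== SOURCE B (Python) =====
-- def obtenerSecuenciasRec(x, y, m, n, matriz):
--     memo = {}
--
--     def solve(m, n):
--         if m == 0 or n == 0:
--             return [""]
--         key = (m, n)
--         if key in memo:
--             return memo[key]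
--         if x[m - 1] == y[n - 1]:
--             res = [s + x[m - 1] for s in solve(m - 1, n - 1)]
--         elif matriz[m - 1][n] > matriz[m][n - 1]:
--             res = solve(m - 1, n)
--         elif matriz[m][n - 1] > matriz[m - 1][n]:
--             res = solve(m, n - 1)
--         else:
--             res = solve(m - 1, n) + solve(m, n - 1)
--         memo[key] = res
--         return res
--
--     return solve(m, n)
-- ===== Notes on version B (the rewrite author's own statement) =====
-- stated objective: alternative
-- what changed: B replaces A's plain recursion (which recomputes every overlapping (m,n) subproblem, exponentially many times on tie-heavy matrices) by a memoized recursion that stores the list of sequences per (m,n) state in a dict and reuses it.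
-- outside the precondition, e.g. on obtenerSecuenciasRec('ab', 'ab', -1, 1, [[0, 0], [0, 0]]): A returns ['a'], B returns ['a']; on obtenerSecuenciasRec('a', 'a', 1, 1, []): A returns ['a'], B returns ['a']
import Mathlib
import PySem

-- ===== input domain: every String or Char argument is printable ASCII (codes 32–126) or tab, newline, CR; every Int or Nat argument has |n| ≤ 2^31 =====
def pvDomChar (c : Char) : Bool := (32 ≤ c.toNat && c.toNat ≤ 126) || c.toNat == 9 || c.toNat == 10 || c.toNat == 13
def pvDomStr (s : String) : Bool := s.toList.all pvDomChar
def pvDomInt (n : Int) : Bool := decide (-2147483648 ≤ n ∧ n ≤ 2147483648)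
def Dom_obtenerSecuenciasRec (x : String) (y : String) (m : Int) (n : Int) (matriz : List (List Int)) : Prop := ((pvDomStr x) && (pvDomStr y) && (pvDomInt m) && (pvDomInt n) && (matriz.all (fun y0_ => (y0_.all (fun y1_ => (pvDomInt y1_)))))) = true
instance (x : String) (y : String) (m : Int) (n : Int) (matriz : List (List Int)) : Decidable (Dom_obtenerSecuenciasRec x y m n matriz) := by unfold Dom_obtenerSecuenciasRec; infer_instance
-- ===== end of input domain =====

-- B memoizes the per-(m,n) LCS-string lists in a dict, removing A's recomputation of
-- overlapping subproblems; equivalence of return values is proved on Pre_ below.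

-- ===== PORT A =====
-- matriz[i][j] (two chained Python indexings; none = IndexError)
def pvMatGet? (matriz : List (List Int)) (i j : Int) : Option Int :=
  (PySem.List.pyGet? matriz i).bind (fun row => PySem.List.pyGet? row j)

-- A's while loop: nuevoSet[i] = nuevoSet[i] + x[m-1] over the whole list
def pvAppendSuffix : List String → Char → List String
  | [], _ => []
  | s :: rest, c => (s.push c) :: pvAppendSuffix rest c

-- A's recursion, made total with fuel (Python's recursion depth is m+n on Pre_);
-- [] marks the IndexError branches, which Pre_ excludes
def pvGoA (x y : String) (matriz : List (List Int)) : Nat → Int → Int → List String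
  | 0, _, _ => []
  | fuel+1, m, n =>
    if m = 0 ∨ n = 0 then [""]
    else
      match PySem.Str.pyGet? x (m - 1), PySem.Str.pyGet? y (n - 1) with
      | some a, some b =>
        if a = b then pvAppendSuffix (pvGoA x y matriz fuel (m - 1) (n - 1)) a
        else
          match pvMatGet? matriz (m - 1) n, pvMatGet? matriz m (n - 1) with
          | some top, some left =>
            if top > left then pvGoA x y matriz fuel (m - 1) n
            else if left > top then pvGoA x y matriz fuel m (n - 1)
            else pvGoA x y matriz fuel (m - 1) n ++ pvGoA x y matriz fuel m (n - 1)
          | _, _ => []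
      | _, _ => []

def obtenerSecuenciasRec (x : String) (y : String) (m : Int) (n : Int) (matriz : List (List Int)) : List String :=
  pvGoA x y matriz (m.toNat + n.toNat + 1) m n

-- ===== PORT B =====
def pvMemo := PySem.Dict (Int × Int) (List String)

-- "memo[key] = res; return res"
def pvStore (m n : Int) (r : List String × pvMemo) : List String × pvMemo :=
  (r.1, r.2.insert (m, n) r.1)

-- B's memoized recursion, same fuel guard; [] marks the IndexError branches
def pvGoB (x y : String) (matriz : List (List Int)) : Nat → Int → Int → pvMemo → List String × pvMemo
  | 0, _, _, memo => ([], memo)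
  | fuel+1, m, n, memo =>
    if m = 0 ∨ n = 0 then ([""], memo)
    else
      match PySem.Dict.get? memo (m, n) with
      | some v => (v, memo)
      | none =>
        pvStore m n
          (match PySem.Str.pyGet? x (m - 1), PySem.Str.pyGet? y (n - 1) with
           | some a, some b =>
             if a = b then
               ((pvGoB x y matriz fuel (m - 1) (n - 1) memo).1.map (fun s => s.push a),
                (pvGoB x y matriz fuel (m - 1) (n - 1) memo).2)
             else
               match pvMatGet? matriz (m - 1) n, pvMatGet? matriz m (n - 1) with
               | some top, some left =>
                 if top > left then pvGoB x y matriz fuel (m - 1) n memo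
                 else if left > top then pvGoB x y matriz fuel m (n - 1) memo
                 else
                   ((pvGoB x y matriz fuel (m - 1) n memo).1 ++
                      (pvGoB x y matriz fuel m (n - 1) (pvGoB x y matriz fuel (m - 1) n memo).2).1,
                    (pvGoB x y matriz fuel m (n - 1) (pvGoB x y matriz fuel (m - 1) n memo).2).2)
               | _, _ => ([], memo)
           | _, _ => ([], memo))

def obtenerSecuenciasRec_alt (x : String) (y : String) (m : Int) (n : Int) (matriz : List (List Int)) : List String :=
  (pvGoB x y matriz (m.toNat + n.toNat + 1) m n PySem.Dict.empty).1

-- ===== PRECONDITION & SPEC =====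
-- Pre_ admits the base case (m = 0 or n = 0, where A reads nothing) and otherwise
-- 0 ≤ m ≤ len(x), 0 ≤ n ≤ len(y) and a matrix with more than m rows, each longer than n —
-- the shape on which every index the recursion can touch is valid.  Outside it A usually
-- raises IndexError; on some excluded inputs Python's negative-index wraparound (m or n
-- negative) or a too-short/ragged matrix the chosen path never reads still lets A return —
-- B returns the same value there (the Python B indexes identically), the exclusion only
-- bounds the fuel of the Lean ports.
def Pre_obtenerSecuenciasRec (x : String) (y : String) (m : Int) (n : Int) (matriz : List (List Int)) : Prop :=
  (m = 0 ∨ n = 0) ∨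
    (0 ≤ m ∧ m ≤ (x.length : Int) ∧ 0 ≤ n ∧ n ≤ (y.length : Int) ∧
      m < (matriz.length : Int) ∧ ∀ row ∈ matriz, n < (row.length : Int))
instance (x : String) (y : String) (m : Int) (n : Int) (matriz : List (List Int)) : Decidable (Pre_obtenerSecuenciasRec x y m n matriz) := by unfold Pre_obtenerSecuenciasRec; infer_instance

def pvWitness_obtenerSecuenciasRec : String × String × Int × Int × List (List Int) :=
  ("ab", "ba", 2, 2, [[0, 0, 0], [0, 1, 1], [0, 1, 1]])

def Spec_obtenerSecuenciasRec (x : String) (y : String) (m : Int) (n : Int) (matriz : List (List Int)) (out : List String) : Prop := out = obtenerSecuenciasRec_alt x y m n matriz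
instance (x : String) (y : String) (m : Int) (n : Int) (matriz : List (List Int)) (out : List String) : Decidable (Spec_obtenerSecuenciasRec x y m n matriz out) := by unfold Spec_obtenerSecuenciasRec; infer_instance

-- ===== CLAIM (what is proved, stated in full; the proofs are below) =====
def Claim_equal_obtenerSecuenciasRec : Prop := ∀ (x : String) (y : String) (m : Int) (n : Int) (matriz : List (List Int)), Dom_obtenerSecuenciasRec x y m n matriz → Pre_obtenerSecuenciasRec x y m n matriz → Spec_obtenerSecuenciasRec x y m n matriz (obtenerSecuenciasRec x y m n matriz)

-- ===== LEMMAS AND PROOFS =====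

theorem pvWitness_ok :
    Dom_obtenerSecuenciasRec pvWitness_obtenerSecuenciasRec.1 pvWitness_obtenerSecuenciasRec.2.1
      pvWitness_obtenerSecuenciasRec.2.2.1 pvWitness_obtenerSecuenciasRec.2.2.2.1
      pvWitness_obtenerSecuenciasRec.2.2.2.2 ∧
    Pre_obtenerSecuenciasRec pvWitness_obtenerSecuenciasRec.1 pvWitness_obtenerSecuenciasRec.2.1
      pvWitness_obtenerSecuenciasRec.2.2.1 pvWitness_obtenerSecuenciasRec.2.2.2.1
      pvWitness_obtenerSecuenciasRec.2.2.2.2 := by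
  constructor <;> decide

theorem pvAppendSuffix_eq_map (l : List String) (c : Char) :
    pvAppendSuffix l c = l.map (fun s => s.push c) := by
  induction l with
  | nil => rfl
  | cons s rest ih => simp [pvAppendSuffix, ih]

-- the value of A's recursion does not depend on the fuel, as long as it exceeds m+n
theorem pvGoA_fuel (x y : String) (matriz : List (List Int)) :
    ∀ f1 f2 (m n : Int), 0 ≤ m → 0 ≤ n → m.toNat + n.toNat < f1 → m.toNat + n.toNat < f2 →
      pvGoA x y matriz f1 m n = pvGoA x y matriz f2 m n := by
  intro f1
  induction f1 with
  | zero => intro f2 m n _ _ h1 _; omega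
  | succ g1 ih =>
    intro f2 m n hm hn h1 h2
    cases f2 with
    | zero => omega
    | succ g2 =>
      by_cases hbase : m = 0 ∨ n = 0
      · simp [pvGoA, hbase]
      · push Not at hbase
        have hm1 : (1:Int) ≤ m := by omega
        have hn1 : (1:Int) ≤ n := by omega
        have e1 : pvGoA x y matriz g1 (m - 1) (n - 1) = pvGoA x y matriz g2 (m - 1) (n - 1) :=
          ih g2 (m - 1) (n - 1) (by omega) (by omega) (by omega) (by omega)
        have e2 : pvGoA x y matriz g1 (m - 1) n = pvGoA x y matriz g2 (m - 1) n :=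
          ih g2 (m - 1) n (by omega) (by omega) (by omega) (by omega)
        have e3 : pvGoA x y matriz g1 m (n - 1) = pvGoA x y matriz g2 m (n - 1) :=
          ih g2 m (n - 1) (by omega) (by omega) (by omega) (by omega)
        simp only [pvGoA, hbase, false_or, e1, e2, e3]

-- the canonical value: A's recursion with just enough fuel
def pvF (x y : String) (matriz : List (List Int)) (m n : Int) : List String :=
  pvGoA x y matriz (m.toNat + n.toNat + 1) m n

-- memo invariant: every stored list is the canonical value of its state
def pvInv (x y : String) (matriz : List (List Int)) (memo : pvMemo) : Prop :=
  ∀ a b v, PySem.Dict.get? memo (a, b) = some v → v = pvF x y matriz a b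

theorem pvMatGet?_isSome (l : List (List Int)) (i j : Int) (h0 : 0 ≤ i)
    (h : i < (l.length : Int)) (h2 : 0 ≤ j) (hr : ∀ r ∈ l, j < (r.length : Int)) :
    ∃ v, pvMatGet? l i j = some v := by
  have h1 := PySem.List.pyGet?_eq_some_getElem (xs := l) (i := i) h0 (by simpa using h)
  have hrow : l[i.toNat]'(by omega) ∈ l := List.getElem_mem _
  have h2' := PySem.List.pyGet?_eq_some_getElem (xs := l[i.toNat]'(by omega)) (i := j) h2
    (by simpa using hr _ hrow)
  exact ⟨_, by simp only [pvMatGet?, h1, Option.bind_some]; exact h2'⟩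

theorem pvInv_insert (x y : String) (matriz : List (List Int)) (memo : pvMemo)
    (m n : Int) (res : List String) (hinv : pvInv x y matriz memo)
    (hres : res = pvF x y matriz m n) :
    pvInv x y matriz (PySem.Dict.insert memo (m, n) res) := by
  intro a b v hv
  rw [PySem.Dict.get?_insert] at hv
  split at hv
  · rename_i hk
    obtain ⟨rfl, rfl⟩ := Prod.mk.injEq .. ▸ hk
    cases hv; exact hres
  · exact hinv a b v hv

theorem pvGoB_correct (x y : String) (matriz : List (List Int)) :
    ∀ fuel (m n : Int) (memo : pvMemo),
      0 ≤ m → m ≤ (x.length : Int) → 0 ≤ n → n ≤ (y.length : Int) →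
      (m = 0 ∨ n = 0 ∨ (m < (matriz.length : Int) ∧ ∀ row ∈ matriz, n < (row.length : Int))) →
      m.toNat + n.toNat < fuel → pvInv x y matriz memo →
      (pvGoB x y matriz fuel m n memo).1 = pvF x y matriz m n ∧
        pvInv x y matriz (pvGoB x y matriz fuel m n memo).2 := by
  intro fuel
  induction fuel with
  | zero => intro m n memo _ _ _ _ _ hf _; omega
  | succ g ih =>
    intro m n memo hm hmx hn hny hshape hf hinv
    have hFg : pvF x y matriz m n = pvGoA x y matriz (g + 1) m n :=
      pvGoA_fuel x y matriz (m.toNat + n.toNat + 1) (g + 1) m n hm hn (by omega) hf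
    by_cases hbase : m = 0 ∨ n = 0
    · constructor
      · simp [pvGoB, hbase, hFg, pvGoA]
      · simpa [pvGoB, hbase] using hinv
    · push Not at hbase
      have hcond : ¬ (m = 0 ∨ n = 0) := by omega
      rcases hget : PySem.Dict.get? memo (m, n) with _ | v
      · -- memo miss: compute, then store
        have hshape' : m < (matriz.length : Int) ∧ ∀ row ∈ matriz, n < (row.length : Int) := by
          rcases hshape with h | h | h
          · omega
          · omega
          · exact h
        -- the two character lookups and four matrix lookups succeed
        obtain ⟨a, hxa⟩ : ∃ a, PySem.List.pyGet? x.toList (m - 1) = some a :=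
          ⟨_, PySem.List.pyGet?_eq_some_getElem (xs := x.toList) (i := m - 1)
            (by omega) (by simp; omega)⟩
        obtain ⟨b, hyb⟩ : ∃ b, PySem.List.pyGet? y.toList (n - 1) = some b :=
          ⟨_, PySem.List.pyGet?_eq_some_getElem (xs := y.toList) (i := n - 1)
            (by omega) (by simp; omega)⟩
        obtain ⟨top, htop⟩ : ∃ v, pvMatGet? matriz (m - 1) n = some v :=
          pvMatGet?_isSome matriz (m - 1) n (by omega) (by omega) hn
            (fun r hr => hshape'.2 r hr)
        obtain ⟨left, hleft⟩ : ∃ v, pvMatGet? matriz m (n - 1) = some v :=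
          pvMatGet?_isSome matriz m (n - 1) hm hshape'.1 (by omega)
            (fun r hr => by have := hshape'.2 r hr; omega)
        -- IH instances for the three substates
        have ih11 := ih (m - 1) (n - 1) memo (by omega) (by omega) (by omega) (by omega)
          (by right; right; exact ⟨by omega, fun r hr => by have := hshape'.2 r hr; omega⟩)
          (by omega) hinv
        have ih10 := ih (m - 1) n memo (by omega) (by omega) hn hny
          (by right; right; exact ⟨by omega, hshape'.2⟩) (by omega) hinv
        have ih01m := fun memo' hinv' => ih m (n - 1) memo' hm hmx (by omega) (by omega)
          (by right; right; exact ⟨hshape'.1, fun r hr => by have := hshape'.2 r hr; omega⟩)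
          (by omega) hinv'
        -- canonical values of the substates, with fuel g
        have c11 : pvGoA x y matriz g (m - 1) (n - 1) = pvF x y matriz (m - 1) (n - 1) :=
          pvGoA_fuel x y matriz g _ _ _ (by omega) (by omega) (by omega) (by omega)
        have c10 : pvGoA x y matriz g (m - 1) n = pvF x y matriz (m - 1) n :=
          pvGoA_fuel x y matriz g _ _ _ (by omega) hn (by omega) (by omega)
        have c01 : pvGoA x y matriz g m (n - 1) = pvF x y matriz m (n - 1) :=
          pvGoA_fuel x y matriz g _ _ _ hm (by omega) (by omega) (by omega)
        rw [hFg]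
        by_cases hab : a = b
        · have hA : pvGoA x y matriz (g + 1) m n
              = (pvF x y matriz (m - 1) (n - 1)).map (fun s => s.push a) := by
            simp [pvGoA, hcond, hxa, hyb, hab, pvAppendSuffix_eq_map, c11]
          have hB : pvGoB x y matriz (g + 1) m n memo
              = pvStore m n ((pvGoB x y matriz g (m - 1) (n - 1) memo).1.map (fun s => s.push a),
                  (pvGoB x y matriz g (m - 1) (n - 1) memo).2) := by
            simp [pvGoB, hcond, hget, hxa, hyb, hab]
          refine ⟨?_, ?_⟩
          · rw [hB, hA]; simp [pvStore, ih11.1]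
          · rw [hB]; simp only [pvStore]
            exact pvInv_insert x y matriz _ m n _ ih11.2
              (by rw [hFg, hA, ih11.1])
        · by_cases h1 : top > left
          · have hA : pvGoA x y matriz (g + 1) m n = pvF x y matriz (m - 1) n := by
              simp [pvGoA, hcond, hxa, hyb, hab, htop, hleft, h1, c10]
            have hB : pvGoB x y matriz (g + 1) m n memo
                = pvStore m n (pvGoB x y matriz g (m - 1) n memo) := by
              simp [pvGoB, hcond, hget, hxa, hyb, hab, htop, hleft, h1]
            refine ⟨?_, ?_⟩
            · rw [hB, hA]; simp [pvStore, ih10.1]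
            · rw [hB]; simp only [pvStore]
              exact pvInv_insert x y matriz _ m n _ ih10.2 (by rw [hFg, hA, ih10.1])
          · by_cases h2 : left > top
            · have ih01 := ih01m memo hinv
              have hA : pvGoA x y matriz (g + 1) m n = pvF x y matriz m (n - 1) := by
                simp [pvGoA, hcond, hxa, hyb, hab, htop, hleft, h1, h2, c01]
              have hB : pvGoB x y matriz (g + 1) m n memo
                  = pvStore m n (pvGoB x y matriz g m (n - 1) memo) := by
                simp [pvGoB, hcond, hget, hxa, hyb, hab, htop, hleft, h1, h2]
              refine ⟨?_, ?_⟩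
              · rw [hB, hA]; simp [pvStore, ih01.1]
              · rw [hB]; simp only [pvStore]
                exact pvInv_insert x y matriz _ m n _ ih01.2 (by rw [hFg, hA, ih01.1])
            · have ih01 := ih01m (pvGoB x y matriz g (m - 1) n memo).2 ih10.2
              have hA : pvGoA x y matriz (g + 1) m n
                  = pvF x y matriz (m - 1) n ++ pvF x y matriz m (n - 1) := by
                simp [pvGoA, hcond, hxa, hyb, hab, htop, hleft, h1, h2, c10, c01]
              have hB : pvGoB x y matriz (g + 1) m n memo
                  = pvStore m n
                      ((pvGoB x y matriz g (m - 1) n memo).1 ++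
                         (pvGoB x y matriz g m (n - 1) (pvGoB x y matriz g (m - 1) n memo).2).1,
                       (pvGoB x y matriz g m (n - 1) (pvGoB x y matriz g (m - 1) n memo).2).2) := by
                simp [pvGoB, hcond, hget, hxa, hyb, hab, htop, hleft, h1, h2]
              refine ⟨?_, ?_⟩
              · rw [hB, hA]; simp [pvStore, ih10.1, ih01.1]
              · rw [hB]; simp only [pvStore]
                exact pvInv_insert x y matriz _ m n _ ih01.2
                  (by rw [hFg, hA]; simp [ih10.1, ih01.1])
      · -- memo hit
        have hv := hinv m n v hget
        constructor
        · simp [pvGoB, hcond, hget, hv]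
        · simpa [pvGoB, hcond, hget] using hinv

-- ===== VERDICT (by name: the statement is the Claim_ definition above) =====
theorem obtenerSecuenciasRec_spec : Claim_equal_obtenerSecuenciasRec := by
  intro x y m n matriz _ hpre
  unfold Spec_obtenerSecuenciasRec obtenerSecuenciasRec obtenerSecuenciasRec_alt
  rcases hpre with hbase | ⟨hm, hmx, hn, hny, hms, hrows⟩
  · simp only [pvGoA, pvGoB, if_pos hbase]
  · have h := pvGoB_correct x y matriz (m.toNat + n.toNat + 1) m n PySem.Dict.empty
      hm hmx hn hny (Or.inr (Or.inr ⟨hms, hrows⟩)) (by omega)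
      (by intro a b v hv; simp [PySem.Dict.get?, PySem.Dict.empty] at hv)
    rw [h.1]; rfl
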